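-- pv_equiv track=rewrite | github.com/DK0806/2311mc20_Assignment-07 | min_cost_nodes.py | min_cost_nodes
-- ===== SOURCE A (Python) =====
-- def min_cost_nodes(nodes, edges):
--     # Convert edge list to adjacency list
--     graph = {node: [] for node in nodes}
--     for u, v in edges:
--         graph[u].append(v)
--         graph[v].append(u)
--
--     visited = set()
--     selected = set()
--
--     def dfs(node):
--         if node in visited:
--             return
--         visited.add(node)
--
--         is_adj_selected = any(neighbor in selected for neighbor in graph[node])
--         if not is_adj_selected:
--             selected.add(node)
--         for neighbor in graph[node]:
--             if neighbor not in visited: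
--                 dfs(neighbor)
--
--     for node in nodes:
--         if node not in visited:
--             dfs(node)
--
--     return selected
-- ===== SOURCE B (Python) =====
-- def min_cost_nodes(nodes, edges):
--     # Adjacency: flatten each undirected edge into its two directed pairs,
--     # then one loop appending each pair's target to its source's list.
--     pairs = [p for (u, v) in edges for p in ((u, v), (v, u))]
--     graph = {n: [] for n in nodes}
--     for a, w in pairs:
--         graph[a].append(w)
--
--     # Phase 1: the DFS pre-order visit sequence alone (explicit stack, no selection).
--     order = []
--     seen = set()
--     stack = list(reversed(nodes))
--     while stack:
--         node = stack.pop()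
--         if node in seen:
--             continue
--         seen.add(node)
--         order.append(node)
--         stack.extend(reversed(graph[node]))
--
--     # Phase 2: greedy selection along the visit order. Correct because A decides
--     # selection at visit time using only nodes visited (and selected) earlier.
--     selected = set()
--     for node in order:
--         if all(nb not in selected for nb in graph[node]):
--             selected.add(node)
--     return selected
-- ===== Notes on version B (the rewrite author's own statement) =====
-- stated objective: alternative
-- what changed: A's single recursive DFS with inline greedy selection is replaced by a staged pipeline: the edge list is flattened into directed pairs and the adjacency dict filled by one loop over them, an iterative explicit-stack loop computes only the DFS pre-order visit sequence, and a separate second greedy pass over that sequence does the selection; correct because A's selection at a node depends only on earlier-visited nodes.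
import Mathlib
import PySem

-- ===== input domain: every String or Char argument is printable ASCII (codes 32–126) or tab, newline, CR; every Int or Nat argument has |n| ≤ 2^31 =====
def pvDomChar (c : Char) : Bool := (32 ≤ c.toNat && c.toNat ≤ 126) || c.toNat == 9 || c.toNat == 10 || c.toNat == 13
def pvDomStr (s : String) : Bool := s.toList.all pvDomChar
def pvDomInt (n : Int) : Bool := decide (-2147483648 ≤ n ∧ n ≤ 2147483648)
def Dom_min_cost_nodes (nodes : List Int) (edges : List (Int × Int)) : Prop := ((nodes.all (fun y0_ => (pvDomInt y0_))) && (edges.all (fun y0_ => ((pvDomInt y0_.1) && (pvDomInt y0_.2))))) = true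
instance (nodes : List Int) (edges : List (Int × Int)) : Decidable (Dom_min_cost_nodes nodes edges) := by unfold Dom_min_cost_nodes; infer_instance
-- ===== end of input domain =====

-- B replaces A's recursive DFS with inline greedy selection by a staged pipeline
-- (comprehension-built adjacency, an iterative stack loop computing only the DFS
-- pre-order visit sequence, then a separate greedy pass over that sequence);
-- objective: alternative decomposition, same selected set.

-- ===== PORT A =====
-- graph = {node: [] for node in nodes}; for u, v in edges: graph[u].append(v); graph[v].append(u)
-- Dict.modify inserts the default where Python's graph[u].append would raise KeyError;
-- exact under Pre_min_cost_nodes, which demands every edge endpoint to be in nodes.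
def pvBuildGraph (nodes : List Int) (edges : List (Int × Int)) : PySem.Dict Int (List Int) :=
  edges.foldl
    (fun g e => (g.modify e.1 [] (fun l => l ++ [e.2])).modify e.2 [] (fun l => l ++ [e.1]))
    (nodes.foldl (fun g n => g.insert n []) PySem.Dict.empty)

-- A's recursive dfs; state = (visited, selected).  Fuel is a Lean termination artifact:
-- recursion depth is bounded by the number of unvisited graph keys, so graph.keys.length + 1
-- never runs out on inputs satisfying Pre_min_cost_nodes (proved below via pvDfsA_stab).
def pvDfsA (graph : PySem.Dict Int (List Int)) :
    Nat → Int → PySem.Set Int × PySem.Set Int → PySem.Set Int × PySem.Set Int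
  | 0, _, st => st
  | f+1, node, st =>
    if PySem.Set.contains st.1 node then st
    else
      (graph.getD node []).foldl
        (fun s nb => if PySem.Set.contains s.1 nb then s else pvDfsA graph f nb s)
        (PySem.Set.add st.1 node,
         if (graph.getD node []).any (fun nb => PySem.Set.contains st.2 nb) then st.2
         else PySem.Set.add st.2 node)

def min_cost_nodes (nodes : List Int) (edges : List (Int × Int)) : List Int :=
  (nodes.foldl
    (fun s n =>
      if PySem.Set.contains s.1 n then s
      else pvDfsA (pvBuildGraph nodes edges) ((pvBuildGraph nodes edges).keys.length + 1) n s)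
    (PySem.Set.empty, PySem.Set.empty)).2

-- ===== PORT B =====
-- pairs = [p for (u, v) in edges for p in ((u, v), (v, u))]
def pvPairs (edges : List (Int × Int)) : List (Int × Int) :=
  edges.flatMap (fun e => [(e.1, e.2), (e.2, e.1)])

-- graph = {n: [] for n in nodes}; for a, w in pairs: graph[a].append(w)
-- Dict.modify inserts the default where Python's graph[a].append would raise KeyError;
-- exact under Pre_min_cost_nodes (every pair source is an edge endpoint, hence in nodes).
def pvGraphB (nodes : List Int) (edges : List (Int × Int)) : PySem.Dict Int (List Int) :=
  (pvPairs edges).foldl (fun g p => g.modify p.1 [] (fun l => l ++ [p.2]))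
    (nodes.foldl (fun g n => g.insert n []) PySem.Dict.empty)

-- Phase 1 of Source B: the while-stack loop producing the visit order only.  The Python
-- list-stack (pop from the end, extend with reversed neighbours) is modelled head-on-top,
-- so push-reversed = prepend the neighbour list; graph[node] is getD (exact under Pre_).
-- Fuel is a termination artifact: pops ≤ |nodes| + Σ_k (1 + deg k), supplied exactly below.
def pvOrderLoop (graph : PySem.Dict Int (List Int)) :
    Nat → List Int → PySem.Set Int → List Int → List Int
  | 0, _, _, ord => ord
  | _+1, [], _, ord => ord
  | f+1, node :: rest, seen, ord =>
    if PySem.Set.contains seen node then pvOrderLoop graph f rest seen ord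
    else pvOrderLoop graph f (graph.getD node [] ++ rest)
          (PySem.Set.add seen node) (ord ++ [node])

def pvFuelB (nodes : List Int) (edges : List (Int × Int)) : Nat :=
  nodes.length +
    ((pvGraphB nodes edges).keys.map
      (fun k => 1 + ((pvGraphB nodes edges).getD k []).length)).sum

-- Phase 2 of Source B: greedy selection along the visit order.
def min_cost_nodes_alt (nodes : List Int) (edges : List (Int × Int)) : List Int :=
  (pvOrderLoop (pvGraphB nodes edges) (pvFuelB nodes edges) nodes PySem.Set.empty []).foldl
    (fun sel node =>
      if ((pvGraphB nodes edges).getD node []).all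
          (fun nb => !(PySem.Set.contains sel nb)) then PySem.Set.add sel node
      else sel)
    PySem.Set.empty

-- ===== PRECONDITION & SPEC =====
-- Pre_ excludes exactly the inputs where Python A raises KeyError while building the adjacency
-- list: an edge endpoint that is not in nodes (B raises a KeyError on such inputs too, at latest
-- when traversal reaches the stray vertex).
def Pre_min_cost_nodes (nodes : List Int) (edges : List (Int × Int)) : Prop :=
  ∀ e ∈ edges, e.1 ∈ nodes ∧ e.2 ∈ nodes
instance (nodes : List Int) (edges : List (Int × Int)) : Decidable (Pre_min_cost_nodes nodes edges) := by unfold Pre_min_cost_nodes; infer_instance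

def pvWitness_min_cost_nodes : List Int × (List (Int × Int)) := ([1, 2, 3, 4], [(1, 2), (2, 3), (1, 3)])

def Spec_min_cost_nodes (nodes : List Int) (edges : List (Int × Int)) (out : List Int) : Prop := out = min_cost_nodes_alt nodes edges
instance (nodes : List Int) (edges : List (Int × Int)) (out : List Int) : Decidable (Spec_min_cost_nodes nodes edges out) := by unfold Spec_min_cost_nodes; infer_instance

-- ===== CLAIM =====
def Claim_equal_min_cost_nodes : Prop := ∀ (nodes : List Int) (edges : List (Int × Int)), Dom_min_cost_nodes nodes edges → Pre_min_cost_nodes nodes edges → Spec_min_cost_nodes nodes edges (min_cost_nodes nodes edges)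

-- ===== LEMMAS AND PROOFS =====

-- Proof intermediate: A's traversal as a single stack loop WITH inline selection
-- (the bridge below shows it equals A's fold of pvDfsA; the order/greedy lemmas
-- then split it into B's two phases).
def pvLoopB (graph : PySem.Dict Int (List Int)) :
    Nat → List Int → PySem.Set Int × PySem.Set Int → PySem.Set Int × PySem.Set Int
  | 0, _, st => st
  | _+1, [], st => st
  | f+1, node :: rest, st =>
    if PySem.Set.contains st.1 node then pvLoopB graph f rest st
    else
      pvLoopB graph f (graph.getD node [] ++ rest)
        (PySem.Set.add st.1 node,
         if (graph.getD node []).any (fun nb => PySem.Set.contains st.2 nb) then st.2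
         else PySem.Set.add st.2 node)

-- weighted count of the still-unvisited keys of g: the termination/stability measure
def pvWf (g : PySem.Dict Int (List Int)) (f : Int → Nat) (vis : PySem.Set Int) : Nat :=
  ((g.keys.filter (fun k => !(PySem.Set.contains vis k))).map f).sum

def pvRank (g : PySem.Dict Int (List Int)) (vis : PySem.Set Int) : Nat :=
  pvWf g (fun _ => 1) vis

def pvW (g : PySem.Dict Int (List Int)) (vis : PySem.Set Int) : Nat :=
  pvWf g (fun k => 1 + (g.getD k []).length) vis

lemma pv_foldl_inv {α σ : Type} (P : σ → Prop) (f : σ → α → σ)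
    (h : ∀ s a, P s → P (f s a)) :
    ∀ (l : List α) (s : σ), P s → P (l.foldl f s) := by
  intro l
  induction l with
  | nil => intro s hs; exact hs
  | cons a l ih => intro s hs; exact ih _ (h s a hs)

lemma pv_foldl_congr_inv {α σ : Type} (P : σ → Prop) (f₁ f₂ : σ → α → σ)
    (hpres : ∀ s a, P s → P (f₁ s a)) (heq : ∀ s a, P s → f₁ s a = f₂ s a) :
    ∀ (l : List α) (s : σ), P s → l.foldl f₁ s = l.foldl f₂ s := by
  intro l
  induction l with
  | nil => intro s _; rfl
  | cons a l ih =>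
    intro s hs
    have h1 := heq s a hs
    simp only [List.foldl_cons, h1]
    rw [← h1]
    exact ih _ (hpres s a hs)

lemma pv_sublist_sum_le (f : Int → Nat) {l l' : List Int} (h : List.Sublist l l') :
    (l.map f).sum ≤ (l'.map f).sum := by
  induction h with
  | slnil => exact Nat.le_refl _
  | cons a _ ih => simp only [List.map_cons, List.sum_cons]; omega
  | cons₂ a _ ih => simp only [List.map_cons, List.sum_cons]; omega

lemma pvWf_anti (g : PySem.Dict Int (List Int)) (f : Int → Nat) {vis vis' : PySem.Set Int}
    (h : ∀ x, x ∈ vis → x ∈ vis') : pvWf g f vis' ≤ pvWf g f vis := by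
  apply pv_sublist_sum_le
  apply List.monotone_filter_right
  intro a ha
  cases hva : PySem.Set.contains vis a with
  | false => simp_all
  | true =>
    exfalso
    have h1 : a ∈ vis := (PySem.Set.contains_iff vis a).mp hva
    simp at ha
    exact ha (h a h1)

lemma pv_sum_filter_ne {f : Int → Nat} {m : List Int} (hnd : m.Nodup) {k : Int} (hk : k ∈ m) :
    (m.map f).sum = f k + ((m.filter (fun x => !(x == k))).map f).sum := by
  induction m with
  | nil => cases hk
  | cons a m ih =>
    by_cases hak : a = k
    · subst hak
      have hnotin : a ∉ m := (List.nodup_cons.mp hnd).1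
      have : m.filter (fun x => !(x == a)) = m := by
        apply List.filter_eq_self.mpr
        intro x hx
        simp only [Bool.not_eq_true', beq_eq_false_iff_ne, ne_eq]
        intro hxa; exact hnotin (hxa ▸ hx)
      simp [this]
    · have hk' : k ∈ m := by
        cases hk with
        | head => exact absurd rfl hak
        | tail _ h => exact h
      have := ih (List.nodup_cons.mp hnd).2 hk'
      simp only [List.filter_cons]
      have hba : (!(a == k)) = true := by simp [hak]
      simp [hba, this]
      omega

lemma pvWf_split (g : PySem.Dict Int (List Int)) (f : Int → Nat) (hnd : g.keys.Nodup)
    {k : Int} (hk : k ∈ g.keys) {vis : PySem.Set Int} (hv : k ∉ vis) :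
    pvWf g f vis = f k + pvWf g f (PySem.Set.add vis k) := by
  unfold pvWf
  have hadd : PySem.Set.add vis k = vis ++ [k] := PySem.Set.add_of_not_mem hv
  have hfilter : g.keys.filter (fun x => !(PySem.Set.contains (PySem.Set.add vis k) x))
      = (g.keys.filter (fun x => !(PySem.Set.contains vis x))).filter (fun x => !(x == k)) := by
    rw [List.filter_filter]
    apply List.filter_congr
    intro x _
    rw [hadd]
    simp only [PySem.Set.contains_eq_listContains, List.contains_append,
      List.contains_cons, List.contains_nil]
    cases hxk : x == k <;> cases hxv : List.contains vis x <;> simp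
  rw [hfilter]
  apply pv_sum_filter_ne
  · exact hnd.filter _
  · apply List.mem_filter.mpr
    refine ⟨hk, ?_⟩
    simp only [PySem.Set.contains_eq_listContains, Bool.not_eq_eq_eq_not, Bool.not_true]
    cases hxv : List.contains vis k
    · rfl
    · exact absurd ((PySem.Set.contains_iff vis k).mp hxv) hv

lemma pvRank_le (g : PySem.Dict Int (List Int)) (vis : PySem.Set Int) :
    pvRank g vis ≤ g.keys.length := by
  unfold pvRank pvWf
  have h1 : ∀ (m : List Int), (m.map (fun _ => (1 : Nat))).sum = m.length := by
    intro m; induction m with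
    | nil => rfl
    | cons a m ih => simp [Nat.add_comm]
  rw [h1]
  exact List.length_filter_le _ _

lemma pv_nodup_keys_build (nodes : List Int) (edges : List (Int × Int)) :
    (pvBuildGraph nodes edges).keys.Nodup := by
  unfold pvBuildGraph
  have hmod : ∀ (d : PySem.Dict Int (List Int)) (k : Int) (fn : List Int → List Int),
      d.keys.Nodup → (d.modify k [] fn).keys.Nodup := by
    intro d k fn h
    have := PySem.Dict.keys_modify d k [] fn
    have h2 := PySem.Dict.nodup_keys_insert d k (fn (d.getD k [])) h
    simpa [this] using h2
  have hbase : (nodes.foldl (fun g n => g.insert n ([] : List Int)) PySem.Dict.empty).keys.Nodup :=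
    PySem.Dict.nodup_keys_foldl_insert nodes (fun _ _ => []) _ PySem.Dict.nodup_keys_empty
  exact pv_foldl_inv (fun d : PySem.Dict Int (List Int) => d.keys.Nodup) _
    (fun d e hd => hmod _ _ _ (hmod _ _ _ hd)) edges _ hbase

lemma pvDfsA_mono (g : PySem.Dict Int (List Int)) :
    ∀ (f : Nat) (node : Int) (st : PySem.Set Int × PySem.Set Int),
      st.1 ⊆ (pvDfsA g f node st).1 := by
  intro f
  induction f with
  | zero => intro node st; simp only [pvDfsA]; exact fun x hx => hx
  | succ f ih =>
    intro node st
    simp only [pvDfsA]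
    by_cases h : PySem.Set.contains st.1 node
    · rw [if_pos h]; exact fun x hx => hx
    · rw [if_neg h]
      apply pv_foldl_inv (fun s : PySem.Set Int × PySem.Set Int => st.1 ⊆ s.1)
      · intro s nb hs
        by_cases hv : PySem.Set.contains s.1 nb
        · rw [if_pos hv]; exact hs
        · rw [if_neg hv]; exact hs.trans (ih nb s)
      · intro x hx
        exact (PySem.Set.mem_add st.1 node x).mpr (Or.inl hx)

lemma pvDfsA_stab (g : PySem.Dict Int (List Int)) (hnd : g.keys.Nodup) :
    ∀ (n f f' : Nat) (node : Int) (st : PySem.Set Int × PySem.Set Int),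
      pvRank g st.1 ≤ n → pvRank g st.1 < f → pvRank g st.1 < f' →
      pvDfsA g f node st = pvDfsA g f' node st := by
  intro n
  induction n using Nat.strong_induction_on with
  | _ n ih =>
    intro f f' node st h0 hf hf'
    cases f with
    | zero => omega
    | succ a =>
    cases f' with
    | zero => omega
    | succ b =>
    simp only [pvDfsA]
    by_cases hvis : PySem.Set.contains st.1 node
    · rw [if_pos hvis, if_pos hvis]
    · rw [if_neg hvis, if_neg hvis]
      by_cases hkK : node ∈ g.keys
      · have hmem : node ∉ st.1 := fun hm => hvis ((PySem.Set.contains_iff st.1 node).mpr hm)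
        have hsplit : pvRank g st.1 = 1 + pvRank g (PySem.Set.add st.1 node) :=
          pvWf_split g (fun _ => 1) hnd hkK hmem
        apply pv_foldl_congr_inv
          (fun s : PySem.Set Int × PySem.Set Int => PySem.Set.add st.1 node ⊆ s.1)
        · intro s nb hs
          by_cases hv : PySem.Set.contains s.1 nb
          · rw [if_pos hv]; exact hs
          · rw [if_neg hv]; exact hs.trans (pvDfsA_mono g a nb s)
        · intro s nb hs
          by_cases hv : PySem.Set.contains s.1 nb
          · rw [if_pos hv, if_pos hv]
          · rw [if_neg hv, if_neg hv]
            have hle : pvRank g s.1 ≤ pvRank g (PySem.Set.add st.1 node) :=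
              pvWf_anti g _ (fun x hx => hs hx)
            exact ih (pvRank g (PySem.Set.add st.1 node)) (by omega) a b nb s
              (le_refl _ |>.trans hle |>.trans (le_refl _)) (by omega) (by omega)
        · exact fun x hx => hx
      · have hc : g.contains node = false := by
          cases hcc : g.contains node with
          | false => rfl
          | true => exact absurd ((PySem.Dict.contains_iff_mem_keys g node).mp hcc) hkK
        have hget : g.getD node [] = [] := PySem.Dict.getD_of_not_contains g [] hc
        rw [hget]
        simp

lemma pvBridge (g : PySem.Dict Int (List Int)) (hnd : g.keys.Nodup) :
    ∀ (f : Nat) (stack : List Int) (st : PySem.Set Int × PySem.Set Int),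
      stack.length + pvW g st.1 ≤ f →
      pvLoopB g f stack st =
        stack.foldl
          (fun s n =>
            if PySem.Set.contains s.1 n then s
            else pvDfsA g (g.keys.length + 1) n s) st := by
  intro f
  induction f with
  | zero =>
    intro stack st h
    have hnil : stack = [] := List.eq_nil_of_length_eq_zero (by omega)
    subst hnil
    simp only [pvLoopB, List.foldl_nil]
  | succ f ih =>
    intro stack st h
    cases stack with
    | nil => simp only [pvLoopB, List.foldl_nil]
    | cons n rest =>
      simp only [pvLoopB, List.foldl_cons]
      by_cases hvis : PySem.Set.contains st.1 n
      · rw [if_pos hvis, if_pos hvis]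
        apply ih
        simp only [List.length_cons] at h
        omega
      · rw [if_neg hvis, if_neg hvis]
        have hmem : n ∉ st.1 := fun hm => hvis ((PySem.Set.contains_iff st.1 n).mpr hm)
        by_cases hkK : n ∈ g.keys
        · -- n is a key: the weight of the unvisited keys drops by 1 + deg n
          have hsplitW : pvW g st.1 =
              (1 + (g.getD n []).length) + pvW g (PySem.Set.add st.1 n) :=
            pvWf_split g _ hnd hkK hmem
          have hsplitR : pvRank g st.1 = 1 + pvRank g (PySem.Set.add st.1 n) :=
            pvWf_split g (fun _ => 1) hnd hkK hmem
          have hrle : pvRank g st.1 ≤ g.keys.length := pvRank_le g st.1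
          rw [ih]
          · rw [List.foldl_append]
            congr 1
            have hstep : pvDfsA g (g.keys.length + 1) n st
                = List.foldl
                    (fun s nb => if PySem.Set.contains s.1 nb then s
                      else pvDfsA g g.keys.length nb s)
                    (PySem.Set.add st.1 n,
                     if (g.getD n []).any (fun nb => PySem.Set.contains st.2 nb) then st.2
                     else PySem.Set.add st.2 n) (g.getD n []) := by
              conv_lhs => simp only [pvDfsA]
              rw [if_neg hvis]
            rw [hstep]
            apply pv_foldl_congr_inv
              (fun s : PySem.Set Int × PySem.Set Int => PySem.Set.add st.1 n ⊆ s.1)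
            · intro s nb hs
              by_cases hv : PySem.Set.contains s.1 nb
              · rw [if_pos hv]; exact hs
              · rw [if_neg hv]; exact hs.trans (pvDfsA_mono g (g.keys.length + 1) nb s)
            · intro s nb hs
              by_cases hv : PySem.Set.contains s.1 nb
              · rw [if_pos hv, if_pos hv]
              · rw [if_neg hv, if_neg hv]
                have hle : pvRank g s.1 ≤ pvRank g (PySem.Set.add st.1 n) :=
                  pvWf_anti g _ (fun x hx => hs hx)
                exact pvDfsA_stab g hnd g.keys.length (g.keys.length + 1) g.keys.length nb s
                  (by omega) (by omega) (by omega)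
            · exact fun x hx => hx
          · simp only [List.length_append, List.length_cons] at h ⊢
            omega
        · -- n is not a key: no neighbours, weight only shrinks
          have hc : g.contains n = false := by
            cases hcc : g.contains n with
            | false => rfl
            | true => exact absurd ((PySem.Dict.contains_iff_mem_keys g n).mp hcc) hkK
          have hget : g.getD n [] = [] := PySem.Dict.getD_of_not_contains g [] hc
          have hWle : pvW g (PySem.Set.add st.1 n) ≤ pvW g st.1 :=
            pvWf_anti g _ (fun x hx => (PySem.Set.mem_add st.1 n x).mpr (Or.inl hx))
          rw [hget]
          rw [ih]
          · simp only [List.nil_append]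
            congr 1
            have hstep : pvDfsA g (g.keys.length + 1) n st
                = List.foldl
                    (fun s nb => if PySem.Set.contains s.1 nb then s
                      else pvDfsA g g.keys.length nb s)
                    (PySem.Set.add st.1 n,
                     if (g.getD n []).any (fun nb => PySem.Set.contains st.2 nb) then st.2
                     else PySem.Set.add st.2 n) (g.getD n []) := by
              conv_lhs => simp only [pvDfsA]
              rw [if_neg hvis]
            rw [hstep, hget]
            simp
          · simp only [List.nil_append, List.length_cons] at h ⊢
            omega

-- ---- the two adjacency dicts are the same dict: A's double-append loop over the
-- edges equals B's single-append loop over the flattened directed pairs ----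

lemma pv_foldl_pair (edges : List (Int × Int)) :
    ∀ d : PySem.Dict Int (List Int),
      edges.foldl
        (fun g e => (g.modify e.1 [] (fun l => l ++ [e.2])).modify e.2 [] (fun l => l ++ [e.1])) d
      = (edges.flatMap (fun e => [(e.1, e.2), (e.2, e.1)])).foldl
          (fun g p => g.modify p.1 [] (fun l => l ++ [p.2])) d := by
  induction edges with
  | nil => intro d; rfl
  | cons e es ih =>
    intro d
    simp only [List.foldl_cons, List.flatMap_cons, List.cons_append, List.nil_append]
    exact ih _

lemma pv_graph_eq (nodes : List Int) (edges : List (Int × Int)) :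
    pvBuildGraph nodes edges = pvGraphB nodes edges := by
  unfold pvBuildGraph pvGraphB pvPairs
  exact pv_foldl_pair edges _

-- ---- phase split: stack loop with inline selection = order loop + greedy fold ----

lemma pv_all_not (l : List Int) (p : Int → Bool) : l.all (fun x => !p x) = !l.any p := by
  induction l with
  | nil => rfl
  | cons a l ih => by_cases h : p a <;> simp [h, ih]

lemma pvOrder_acc (g : PySem.Dict Int (List Int)) :
    ∀ (f : Nat) (stack : List Int) (seen : PySem.Set Int) (ord : List Int),
      pvOrderLoop g f stack seen ord = ord ++ pvOrderLoop g f stack seen [] := by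
  intro f
  induction f with
  | zero => intro stack seen ord; simp [pvOrderLoop]
  | succ f ih =>
    intro stack seen ord
    cases stack with
    | nil => simp [pvOrderLoop]
    | cons node rest =>
      simp only [pvOrderLoop]
      by_cases h : PySem.Set.contains seen node
      · rw [if_pos h, if_pos h]
        exact ih _ _ _
      · rw [if_neg h, if_neg h]
        rw [ih _ _ (ord ++ [node]), ih _ _ ([] ++ [node])]
        simp

lemma pvPhases (gA gB : PySem.Dict Int (List Int))
    (hg : ∀ k, gA.getD k [] = gB.getD k []) :
    ∀ (f : Nat) (stack : List Int) (seen sel : PySem.Set Int),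
      (pvLoopB gA f stack (seen, sel)).2
        = (pvOrderLoop gB f stack seen []).foldl
            (fun sel node =>
              if (gB.getD node []).all (fun nb => !(PySem.Set.contains sel nb)) then
                PySem.Set.add sel node
              else sel) sel := by
  intro f
  induction f with
  | zero => intro stack seen sel; simp [pvLoopB, pvOrderLoop]
  | succ f ih =>
    intro stack seen sel
    cases stack with
    | nil => simp [pvLoopB, pvOrderLoop]
    | cons node rest =>
      simp only [pvLoopB, pvOrderLoop]
      by_cases h : PySem.Set.contains seen node
      · rw [if_pos h, if_pos h]
        exact ih rest seen sel
      · rw [if_neg h, if_neg h]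
        rw [pvOrder_acc gB f _ _ ([] ++ [node])]
        simp only [List.nil_append, List.singleton_append, List.foldl_cons]
        rw [hg node]
        rw [ih]
        congr 1
        rw [pv_all_not]
        cases hany : (gB.getD node []).any (fun nb => PySem.Set.contains sel nb) <;> simp

-- ===== VERDICT =====
theorem min_cost_nodes_spec : Claim_equal_min_cost_nodes := by
  intro nodes edges _ _
  unfold Spec_min_cost_nodes min_cost_nodes min_cost_nodes_alt
  have hnd := pv_nodup_keys_build nodes edges
  have hEq : pvBuildGraph nodes edges = pvGraphB nodes edges := pv_graph_eq nodes edges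
  have hW0 : pvW (pvBuildGraph nodes edges) PySem.Set.empty
      = ((pvBuildGraph nodes edges).keys.map
          (fun k => 1 + ((pvBuildGraph nodes edges).getD k []).length)).sum := by
    unfold pvW pvWf
    congr 2
    apply List.filter_eq_self.mpr
    intro a _
    simp [PySem.Set.contains_eq_listContains, PySem.Set.empty]
  have hfuel : nodes.length + pvW (pvBuildGraph nodes edges)
        ((PySem.Set.empty, PySem.Set.empty) : PySem.Set Int × PySem.Set Int).1
      ≤ pvFuelB nodes edges := by
    show nodes.length + pvW (pvBuildGraph nodes edges) PySem.Set.empty ≤ _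
    unfold pvFuelB
    rw [← hEq]
    omega
  rw [← pvBridge (pvBuildGraph nodes edges) hnd (pvFuelB nodes edges) nodes
      (PySem.Set.empty, PySem.Set.empty) hfuel]
  exact pvPhases (pvBuildGraph nodes edges) (pvGraphB nodes edges) (fun k => by rw [hEq])
    (pvFuelB nodes edges) nodes PySem.Set.empty PySem.Set.empty
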